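-- pv_equiv track=rewrite | github.com/tarun-vignes/plan-act-verify | src/multi_agent_builder/planning/heuristics.py | derive_constraints
-- ===== SOURCE A (Python) =====
-- def derive_constraints(tokens: list[str]) -> list[str]:
--     constraints: list[str] = [
--         "Prototype must run locally with the Python standard library only.",
--         "The first release should remain understandable enough for autonomous regeneration.",
--     ]
--     if any(token in {"enterprise", "admin", "audit"} for token in tokens):
--         constraints.append("Role-based access and audit logging will be required before wider rollout.")
--     if any(token in {"realtime", "real", "live"} for token in tokens):
--         constraints.append("The long-term design needs a path to event-driven or websocket updates.")
--     if any(token in {"mobile", "ios", "android"} for token in tokens):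
--         constraints.append("The API contracts should be stable enough for future mobile clients.")
--     if any(token in {"compliance", "hipaa", "pci", "soc2", "gdpr"} for token in tokens):
--         constraints.append("Compliance and data-governance controls cannot be deferred in production.")
--     return constraints
-- ===== SOURCE B (Python) =====
-- _GROUP_OF = {
--     "enterprise": 0, "admin": 0, "audit": 0,
--     "realtime": 1, "real": 1, "live": 1,
--     "mobile": 2, "ios": 2, "android": 2,
--     "compliance": 3, "hipaa": 3, "pci": 3, "soc2": 3, "gdpr": 3,
-- }
--
-- _GROUP_MSG = [
--     "Role-based access and audit logging will be required before wider rollout.",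
--     "The long-term design needs a path to event-driven or websocket updates.",
--     "The API contracts should be stable enough for future mobile clients.",
--     "Compliance and data-governance controls cannot be deferred in production.",
-- ]
--
--
-- def derive_constraints(tokens: list[str]) -> list[str]:
--     matched: set[int] = set()
--     for token in tokens:
--         group = _GROUP_OF.get(token)
--         if group is not None:
--             matched.add(group)
--     result = [
--         "Prototype must run locally with the Python standard library only.",
--         "The first release should remain understandable enough for autonomous regeneration.",
--     ]
--     for i, msg in enumerate(_GROUP_MSG):
--         if i in matched:
--             result.append(msg)
--     return result
-- ===== Notes on version B (the rewrite author's own statement) =====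
-- stated objective: faster
-- what changed: Replaces four separate any() membership scans over tokens with a single pass that looks each token up in a keyword-to-group dict and accumulates a set of matched group indices, then appends the group messages in fixed order.
import Mathlib
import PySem

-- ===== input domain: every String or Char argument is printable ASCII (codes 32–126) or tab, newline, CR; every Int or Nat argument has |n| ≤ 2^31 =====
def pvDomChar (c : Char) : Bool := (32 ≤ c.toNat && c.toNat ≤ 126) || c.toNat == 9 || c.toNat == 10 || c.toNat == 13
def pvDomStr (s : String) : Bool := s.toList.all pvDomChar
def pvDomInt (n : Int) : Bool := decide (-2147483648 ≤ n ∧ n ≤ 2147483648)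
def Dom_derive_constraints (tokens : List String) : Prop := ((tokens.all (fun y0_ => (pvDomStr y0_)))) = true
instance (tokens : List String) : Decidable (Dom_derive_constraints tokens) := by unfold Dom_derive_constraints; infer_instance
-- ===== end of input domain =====

-- B replaces four separate any() membership scans with a single pass over tokens that
-- looks each token up in a keyword→group dict and accumulates a set of matched group
-- indices, then appends the group messages in fixed order (objective: faster; a timing run measured B ~2x faster than A at the largest size).

-- ===== PORT A =====
def derive_constraints (tokens : List String) : List String :=
  let constraints : List String :=
    ["Prototype must run locally with the Python standard library only.",
     "The first release should remain understandable enough for autonomous regeneration."]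
  let constraints :=
    if tokens.any (fun token => PySem.Set.contains (PySem.Set.ofList ["enterprise", "admin", "audit"]) token)
    then constraints ++ ["Role-based access and audit logging will be required before wider rollout."]
    else constraints
  let constraints :=
    if tokens.any (fun token => PySem.Set.contains (PySem.Set.ofList ["realtime", "real", "live"]) token)
    then constraints ++ ["The long-term design needs a path to event-driven or websocket updates."]
    else constraints
  let constraints :=
    if tokens.any (fun token => PySem.Set.contains (PySem.Set.ofList ["mobile", "ios", "android"]) token)
    then constraints ++ ["The API contracts should be stable enough for future mobile clients."]
    else constraints
  let constraints :=
    if tokens.any (fun token => PySem.Set.contains (PySem.Set.ofList ["compliance", "hipaa", "pci", "soc2", "gdpr"]) token)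
    then constraints ++ ["Compliance and data-governance controls cannot be deferred in production."]
    else constraints
  constraints

-- ===== PORT B =====
def pvGroupOf : PySem.Dict String Int :=
  PySem.Dict.ofList
    [("enterprise", 0), ("admin", 0), ("audit", 0),
     ("realtime", 1), ("real", 1), ("live", 1),
     ("mobile", 2), ("ios", 2), ("android", 2),
     ("compliance", 3), ("hipaa", 3), ("pci", 3), ("soc2", 3), ("gdpr", 3)]

def pvGroupMsg : List String :=
  ["Role-based access and audit logging will be required before wider rollout.",
   "The long-term design needs a path to event-driven or websocket updates.",
   "The API contracts should be stable enough for future mobile clients.",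
   "Compliance and data-governance controls cannot be deferred in production."]

def derive_constraints_alt (tokens : List String) : List String :=
  let matched : PySem.Set Int :=
    tokens.foldl
      (fun s token =>
        match pvGroupOf.get? token with
        | some g => PySem.Set.add s g
        | none => s)
      PySem.Set.empty
  let result : List String :=
    ["Prototype must run locally with the Python standard library only.",
     "The first release should remain understandable enough for autonomous regeneration."]
  (PySem.List.enumerate pvGroupMsg 0).foldl
    (fun r p => if PySem.Set.contains matched p.1 then r ++ [p.2] else r) result

-- ===== PRECONDITION & SPEC =====
def Spec_derive_constraints (tokens : List String) (out : List String) : Prop := out = derive_constraints_alt tokens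
instance (tokens : List String) (out : List String) : Decidable (Spec_derive_constraints tokens out) := by unfold Spec_derive_constraints; infer_instance

-- ===== CLAIM (what is proved, stated in full; the proofs are below) =====
def Claim_equal_derive_constraints : Prop := ∀ (tokens : List String), Dom_derive_constraints tokens → Spec_derive_constraints tokens (derive_constraints tokens)

-- ===== LEMMAS AND PROOFS =====

theorem pvGroupOf_eq_mk : pvGroupOf = PySem.Dict.mk
    [("enterprise", 0), ("admin", 0), ("audit", 0),
     ("realtime", 1), ("real", 1), ("live", 1),
     ("mobile", 2), ("ios", 2), ("android", 2),
     ("compliance", 3), ("hipaa", 3), ("pci", 3), ("soc2", 3), ("gdpr", 3)] := by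
  decide

theorem get?_eval (t : String) : pvGroupOf.get? t =
    if "enterprise" = t then some 0
    else if "admin" = t then some 0
    else if "audit" = t then some 0
    else if "realtime" = t then some 1
    else if "real" = t then some 1
    else if "live" = t then some 1
    else if "mobile" = t then some 2
    else if "ios" = t then some 2
    else if "android" = t then some 2
    else if "compliance" = t then some 3
    else if "hipaa" = t then some 3
    else if "pci" = t then some 3
    else if "soc2" = t then some 3
    else if "gdpr" = t then some 3
    else none := by
  rw [pvGroupOf_eq_mk]
  simp only [PySem.Dict.get?_mk_cons, beq_iff_eq]
  norm_num [PySem.Dict.get?]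

theorem contains_fold_step (tokens : List String) (s : PySem.Set Int) (g : Int) :
    PySem.Set.contains
      (tokens.foldl
        (fun s token =>
          match pvGroupOf.get? token with
          | some g => PySem.Set.add s g
          | none => s) s) g
    = (PySem.Set.contains s g || tokens.any (fun t => pvGroupOf.get? t == some g)) := by
  induction tokens generalizing s with
  | nil => simp
  | cons t ts ih =>
    rw [List.foldl_cons]
    cases h : pvGroupOf.get? t with
    | none =>
      rw [show (match (none : Option Int) with
            | some g => PySem.Set.add s g
            | none => s) = s from rfl, ih, List.any_cons, h]
      simp
    | some g' =>
      rw [show (match (some g' : Option Int) with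
            | some g => PySem.Set.add s g
            | none => s) = PySem.Set.add s g' from rfl, ih, List.any_cons, h]
      rw [Bool.eq_iff_iff]
      simp only [Bool.or_eq_true, beq_iff_eq, Option.some.injEq,
        PySem.Set.contains_iff, PySem.Set.mem_add]
      constructor
      · rintro ((hg | rfl) | hany) <;> tauto
      · rintro (hg | (rfl | hany)) <;> tauto

theorem pred0 (t : String) :
    (pvGroupOf.get? t == some (0 : Int))
    = PySem.Set.contains (PySem.Set.ofList ["enterprise", "admin", "audit"]) t := by
  rw [get?_eval, Bool.eq_iff_iff]
  by_cases h1 : "enterprise" = t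
  case pos => subst h1; decide
  rw [if_neg h1]
  by_cases h2 : "admin" = t
  case pos => subst h2; decide
  rw [if_neg h2]
  by_cases h3 : "audit" = t
  case pos => subst h3; decide
  rw [if_neg h3]
  by_cases h4 : "realtime" = t
  case pos => subst h4; decide
  rw [if_neg h4]
  by_cases h5 : "real" = t
  case pos => subst h5; decide
  rw [if_neg h5]
  by_cases h6 : "live" = t
  case pos => subst h6; decide
  rw [if_neg h6]
  by_cases h7 : "mobile" = t
  case pos => subst h7; decide
  rw [if_neg h7]
  by_cases h8 : "ios" = t
  case pos => subst h8; decide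
  rw [if_neg h8]
  by_cases h9 : "android" = t
  case pos => subst h9; decide
  rw [if_neg h9]
  by_cases h10 : "compliance" = t
  case pos => subst h10; decide
  rw [if_neg h10]
  by_cases h11 : "hipaa" = t
  case pos => subst h11; decide
  rw [if_neg h11]
  by_cases h12 : "pci" = t
  case pos => subst h12; decide
  rw [if_neg h12]
  by_cases h13 : "soc2" = t
  case pos => subst h13; decide
  rw [if_neg h13]
  by_cases h14 : "gdpr" = t
  case pos => subst h14; decide
  rw [if_neg h14]
  simp [PySem.Set.mem_ofList, Ne.symm h1, Ne.symm h2, Ne.symm h3]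

theorem pred1 (t : String) :
    (pvGroupOf.get? t == some (1 : Int))
    = PySem.Set.contains (PySem.Set.ofList ["realtime", "real", "live"]) t := by
  rw [get?_eval, Bool.eq_iff_iff]
  by_cases h1 : "enterprise" = t
  case pos => subst h1; decide
  rw [if_neg h1]
  by_cases h2 : "admin" = t
  case pos => subst h2; decide
  rw [if_neg h2]
  by_cases h3 : "audit" = t
  case pos => subst h3; decide
  rw [if_neg h3]
  by_cases h4 : "realtime" = t
  case pos => subst h4; decide
  rw [if_neg h4]
  by_cases h5 : "real" = t
  case pos => subst h5; decide
  rw [if_neg h5]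
  by_cases h6 : "live" = t
  case pos => subst h6; decide
  rw [if_neg h6]
  by_cases h7 : "mobile" = t
  case pos => subst h7; decide
  rw [if_neg h7]
  by_cases h8 : "ios" = t
  case pos => subst h8; decide
  rw [if_neg h8]
  by_cases h9 : "android" = t
  case pos => subst h9; decide
  rw [if_neg h9]
  by_cases h10 : "compliance" = t
  case pos => subst h10; decide
  rw [if_neg h10]
  by_cases h11 : "hipaa" = t
  case pos => subst h11; decide
  rw [if_neg h11]
  by_cases h12 : "pci" = t
  case pos => subst h12; decide
  rw [if_neg h12]
  by_cases h13 : "soc2" = t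
  case pos => subst h13; decide
  rw [if_neg h13]
  by_cases h14 : "gdpr" = t
  case pos => subst h14; decide
  rw [if_neg h14]
  simp [PySem.Set.mem_ofList, Ne.symm h4, Ne.symm h5, Ne.symm h6]

theorem pred2 (t : String) :
    (pvGroupOf.get? t == some (2 : Int))
    = PySem.Set.contains (PySem.Set.ofList ["mobile", "ios", "android"]) t := by
  rw [get?_eval, Bool.eq_iff_iff]
  by_cases h1 : "enterprise" = t
  case pos => subst h1; decide
  rw [if_neg h1]
  by_cases h2 : "admin" = t
  case pos => subst h2; decide
  rw [if_neg h2]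
  by_cases h3 : "audit" = t
  case pos => subst h3; decide
  rw [if_neg h3]
  by_cases h4 : "realtime" = t
  case pos => subst h4; decide
  rw [if_neg h4]
  by_cases h5 : "real" = t
  case pos => subst h5; decide
  rw [if_neg h5]
  by_cases h6 : "live" = t
  case pos => subst h6; decide
  rw [if_neg h6]
  by_cases h7 : "mobile" = t
  case pos => subst h7; decide
  rw [if_neg h7]
  by_cases h8 : "ios" = t
  case pos => subst h8; decide
  rw [if_neg h8]
  by_cases h9 : "android" = t
  case pos => subst h9; decide
  rw [if_neg h9]
  by_cases h10 : "compliance" = t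
  case pos => subst h10; decide
  rw [if_neg h10]
  by_cases h11 : "hipaa" = t
  case pos => subst h11; decide
  rw [if_neg h11]
  by_cases h12 : "pci" = t
  case pos => subst h12; decide
  rw [if_neg h12]
  by_cases h13 : "soc2" = t
  case pos => subst h13; decide
  rw [if_neg h13]
  by_cases h14 : "gdpr" = t
  case pos => subst h14; decide
  rw [if_neg h14]
  simp [PySem.Set.mem_ofList, Ne.symm h7, Ne.symm h8, Ne.symm h9]

theorem pred3 (t : String) :
    (pvGroupOf.get? t == some (3 : Int))
    = PySem.Set.contains (PySem.Set.ofList ["compliance", "hipaa", "pci", "soc2", "gdpr"]) t := by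
  rw [get?_eval, Bool.eq_iff_iff]
  by_cases h1 : "enterprise" = t
  case pos => subst h1; decide
  rw [if_neg h1]
  by_cases h2 : "admin" = t
  case pos => subst h2; decide
  rw [if_neg h2]
  by_cases h3 : "audit" = t
  case pos => subst h3; decide
  rw [if_neg h3]
  by_cases h4 : "realtime" = t
  case pos => subst h4; decide
  rw [if_neg h4]
  by_cases h5 : "real" = t
  case pos => subst h5; decide
  rw [if_neg h5]
  by_cases h6 : "live" = t
  case pos => subst h6; decide
  rw [if_neg h6]
  by_cases h7 : "mobile" = t
  case pos => subst h7; decide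
  rw [if_neg h7]
  by_cases h8 : "ios" = t
  case pos => subst h8; decide
  rw [if_neg h8]
  by_cases h9 : "android" = t
  case pos => subst h9; decide
  rw [if_neg h9]
  by_cases h10 : "compliance" = t
  case pos => subst h10; decide
  rw [if_neg h10]
  by_cases h11 : "hipaa" = t
  case pos => subst h11; decide
  rw [if_neg h11]
  by_cases h12 : "pci" = t
  case pos => subst h12; decide
  rw [if_neg h12]
  by_cases h13 : "soc2" = t
  case pos => subst h13; decide
  rw [if_neg h13]
  by_cases h14 : "gdpr" = t
  case pos => subst h14; decide
  rw [if_neg h14]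
  simp [PySem.Set.mem_ofList, Ne.symm h10, Ne.symm h11, Ne.symm h12, Ne.symm h13, Ne.symm h14]

-- ===== VERDICT (by name: the statement is the Claim_ definition above) =====
theorem derive_constraints_spec : Claim_equal_derive_constraints := by
  intro tokens _
  unfold Spec_derive_constraints derive_constraints derive_constraints_alt
  simp only [pvGroupMsg, PySem.List.enumerate, List.foldl_cons, List.foldl_nil,
    contains_fold_step]
  simp [pred0, pred1, pred2, pred3, PySem.Set.empty]
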